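-- pv_equiv track=rewrite | github.com/Vikdyp/Kayo | cogs/voice_management/five_stack.py | can_join_channel
-- ===== SOURCE A (Python) =====
-- from typing import Optional, Dict, Any, List
--
-- def can_join_channel(channel_info: Dict[str, Any], agent_role: str) -> bool:
--     players = channel_info["players"]
--     if len(players) >= 5:
--         return False
--
--     count_sentinel = sum(1 for p in players if p[1] == "sentinel")
--     count_duelist = sum(1 for p in players if p[1] == "duelist")
--     count_controller = sum(1 for p in players if p[1] == "controller")
--     count_initiator = sum(1 for p in players if p[1] == "initiator")
--     count_fill = sum(1 for p in players if p[1] == "fill")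
--
--     if agent_role != "fill":
--         if agent_role == "sentinel" and count_sentinel >= 1:
--             return False
--         if agent_role == "duelist" and count_duelist >= 1:
--             return False
--         if agent_role == "controller" and count_controller >= 1:
--             return False
--         if agent_role == "initiator" and count_initiator >= 1:
--             return False
--         return True
--     else:
--         # fill
--         if count_fill >= 2:
--             return False
--         return True
-- ===== SOURCE B (Python) =====
-- from typing import Optional, Dict, Any, List
--
-- def can_join_channel(channel_info: Dict[str, Any], agent_role: str) -> bool:
--     players = channel_info["players"]
--     if len(players) >= 5:
--         return False
--     # capacity budget for the requested role: fill may appear twice,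
--     # the four unique roles once, any other role is uncapped.
--     if agent_role == "fill":
--         budget = 2
--     elif agent_role in ("sentinel", "duelist", "controller", "initiator"):
--         budget = 1
--     else:
--         return True
--     # single early-exit scan: stop as soon as the budget is exhausted
--     for p in players:
--         if p[1] == agent_role:
--             budget -= 1
--             if budget == 0:
--                 return False
--     return True
-- ===== Notes on version B (the rewrite author's own statement) =====
-- stated objective: alternative
-- what changed: Replaces A's five full generator-sum scans plus if-cascade with a capacity-budget scheme: compute an occupancy budget for the requested role (2 for fill, 1 for unique roles, uncapped otherwise) and do one early-exit scan over players that decrements the budget and stops as soon as it is exhausted; Pre_ excludes only dicts without a 'players' key, where both A and B raise KeyError.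
import Mathlib
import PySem

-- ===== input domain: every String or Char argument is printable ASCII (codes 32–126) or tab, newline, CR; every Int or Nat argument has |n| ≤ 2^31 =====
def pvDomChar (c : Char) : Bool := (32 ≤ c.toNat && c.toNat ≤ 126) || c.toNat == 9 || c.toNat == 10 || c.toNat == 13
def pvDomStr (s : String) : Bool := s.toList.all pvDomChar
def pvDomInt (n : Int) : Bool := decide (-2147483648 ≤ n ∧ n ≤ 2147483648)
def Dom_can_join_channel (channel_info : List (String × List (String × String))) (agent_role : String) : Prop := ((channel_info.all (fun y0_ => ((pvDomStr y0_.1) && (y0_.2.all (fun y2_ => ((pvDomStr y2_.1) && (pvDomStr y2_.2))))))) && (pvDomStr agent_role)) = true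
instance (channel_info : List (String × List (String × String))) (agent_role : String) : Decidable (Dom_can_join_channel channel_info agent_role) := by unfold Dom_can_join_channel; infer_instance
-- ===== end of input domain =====

-- B replaces A's five full counting scans and if-cascade with a capacity budget for the
-- requested role and one early-exit scan (objective: alternative decomposition).

-- ===== PORT A =====
def can_join_channel (channel_info : List (String × List (String × String))) (agent_role : String) : Bool :=
  -- channel_info["players"]: first-match lookup in the association list (KeyError → none, excluded by Pre_)
  match channel_info.find? (fun kv => kv.1 == "players") with
  | none => false
  | some kv =>
    let players := kv.2
    if players.length ≥ 5 then false
    else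
      let count_sentinel : Int := players.foldl (fun acc p => if p.2 == "sentinel" then acc + 1 else acc) 0
      let count_duelist : Int := players.foldl (fun acc p => if p.2 == "duelist" then acc + 1 else acc) 0
      let count_controller : Int := players.foldl (fun acc p => if p.2 == "controller" then acc + 1 else acc) 0
      let count_initiator : Int := players.foldl (fun acc p => if p.2 == "initiator" then acc + 1 else acc) 0
      let count_fill : Int := players.foldl (fun acc p => if p.2 == "fill" then acc + 1 else acc) 0
      if agent_role ≠ "fill" then
        if agent_role == "sentinel" && count_sentinel ≥ 1 then false
        else if agent_role == "duelist" && count_duelist ≥ 1 then false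
        else if agent_role == "controller" && count_controller ≥ 1 then false
        else if agent_role == "initiator" && count_initiator ≥ 1 then false
        else true
      else
        if count_fill ≥ 2 then false else true

-- ===== PORT B =====
-- B's early-exit for-loop: scan players, decrement the budget on each match, stop at 0.
def pvScan (agent_role : String) : List (String × String) → Int → Bool
  | [], _ => true
  | p :: ps, budget =>
    if p.2 == agent_role then
      if budget - 1 = 0 then false else pvScan agent_role ps (budget - 1)
    else pvScan agent_role ps budget

def can_join_channel_alt (channel_info : List (String × List (String × String))) (agent_role : String) : Bool :=
  match channel_info.find? (fun kv => kv.1 == "players") with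
  | none => false
  | some kv =>
    let players := kv.2
    if players.length ≥ 5 then false
    else
      if agent_role == "fill" then pvScan agent_role players 2
      else if agent_role == "sentinel" || agent_role == "duelist" ||
              agent_role == "controller" || agent_role == "initiator" then
        pvScan agent_role players 1
      else true

-- ===== PRECONDITION & SPEC =====
-- Pre_ excludes exactly the dicts without a "players" key, where Python A raises KeyError.
def Pre_can_join_channel (channel_info : List (String × List (String × String))) (agent_role : String) : Prop :=
  "players" ∈ channel_info.map Prod.fst
instance (channel_info : List (String × List (String × String))) (agent_role : String) : Decidable (Pre_can_join_channel channel_info agent_role) := by unfold Pre_can_join_channel; infer_instance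
def pvWitness_can_join_channel : (List (String × List (String × String))) × String :=
  ([("players", [("alice", "duelist")])], "sentinel")

def Spec_can_join_channel (channel_info : List (String × List (String × String))) (agent_role : String) (out : Bool) : Prop := out = can_join_channel_alt channel_info agent_role
instance (channel_info : List (String × List (String × String))) (agent_role : String) (out : Bool) : Decidable (Spec_can_join_channel channel_info agent_role out) := by unfold Spec_can_join_channel; infer_instance

-- ===== CLAIM (what is proved, stated in full; the proofs are below) =====
def Claim_equal_can_join_channel : Prop := ∀ (channel_info : List (String × List (String × String))) (agent_role : String), Dom_can_join_channel channel_info agent_role → Pre_can_join_channel channel_info agent_role → Spec_can_join_channel channel_info agent_role (can_join_channel channel_info agent_role)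

-- ===== LEMMAS AND PROOFS =====

-- A's generator-sum-style fold counts the players with the given role.
theorem pv_countA (players : List (String × String)) (a : Int) (r : String) :
    players.foldl (fun acc p => if p.2 == r then acc + 1 else acc) a
      = a + ((players.map Prod.snd).count r : Int) := by
  induction players generalizing a with
  | nil => simp
  | cons p ps ih =>
    simp only [List.foldl_cons, ih, List.map_cons, List.count_cons]
    split_ifs with h <;> simp_all <;> push_cast <;> ring

-- B's budget scan succeeds exactly when the role occurs fewer than `budget` times.
theorem pv_scan (r : String) (players : List (String × String)) (b : Int) (hb : 1 ≤ b) :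
    pvScan r players b = decide (((players.map Prod.snd).count r : Int) < b) := by
  induction players generalizing b with
  | nil => simp [pvScan]; omega
  | cons p ps ih =>
    simp only [pvScan, List.map_cons, List.count_cons]
    by_cases h : p.2 = r
    · simp only [h, beq_self_eq_true, if_true, if_pos, beq_iff_eq, if_true]
      by_cases h1 : b - 1 = 0
      · simp only [h1, if_true]
        have : ((ps.map Prod.snd).count r : Int) + 1 ≥ b := by
          have : (0:Int) ≤ ((ps.map Prod.snd).count r : Int) := by positivity
          omega
        simp; omega
      · have hb1 : 1 ≤ b - 1 := by omega
        simp only [h1, if_false, ih _ hb1]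
        simp; constructor <;> intro <;> omega
    · have hb2 : (p.2 == r) = false := by simp [h]
      simp [hb2, ih _ hb, h]

theorem pv_body (players : List (String × String)) (agent_role : String) :
    can_join_channel [("players", players)] agent_role
      = can_join_channel_alt [("players", players)] agent_role := by
  unfold can_join_channel can_join_channel_alt
  simp only [List.find?, beq_self_eq_true, if_true]
  by_cases h5 : players.length ≥ 5
  · simp [h5]
  · simp only [h5, if_false, pv_countA, zero_add]
    by_cases hf : agent_role = "fill"
    · subst hf
      rw [pv_scan _ _ 2 (by norm_num)]
      by_cases h : (((players.map Prod.snd).count "fill" : Int)) ≥ 2 <;> simp [h] <;> omega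
    · by_cases hs : agent_role = "sentinel"
      · subst hs
        rw [pv_scan _ _ 1 (by norm_num)]
        by_cases h : (((players.map Prod.snd).count "sentinel" : Int)) ≥ 1 <;> simp [hf, h] <;> omega
      · by_cases hd : agent_role = "duelist"
        · subst hd
          rw [pv_scan _ _ 1 (by norm_num)]
          by_cases h : (((players.map Prod.snd).count "duelist" : Int)) ≥ 1 <;> simp [hf, hs, h] <;> omega
        · by_cases hc : agent_role = "controller"
          · subst hc
            rw [pv_scan _ _ 1 (by norm_num)]
            by_cases h : (((players.map Prod.snd).count "controller" : Int)) ≥ 1 <;> simp [hf, hs, hd, h] <;> omega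
          · by_cases hi : agent_role = "initiator"
            · subst hi
              rw [pv_scan _ _ 1 (by norm_num)]
              by_cases h : (((players.map Prod.snd).count "initiator" : Int)) ≥ 1 <;> simp [hf, hs, hd, hc, h] <;> omega
            · simp [hf, hs, hd, hc, hi]

-- Both ports depend on channel_info only through the first "players" entry.
theorem pv_reduce (channel_info : List (String × List (String × String)))
    (agent_role : String) (players : List (String × String))
    (h : channel_info.find? (fun kv => kv.1 == "players") = some ("players", players)) :
    can_join_channel channel_info agent_role
        = can_join_channel [("players", players)] agent_role ∧
      can_join_channel_alt channel_info agent_role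
        = can_join_channel_alt [("players", players)] agent_role := by
  constructor
  · unfold can_join_channel
    rw [h]
    simp [List.find?]
  · unfold can_join_channel_alt
    rw [h]
    simp [List.find?]

theorem pv_get_some (channel_info : List (String × List (String × String)))
    (h : "players" ∈ channel_info.map Prod.fst) :
    ∃ players, channel_info.find? (fun kv => kv.1 == "players") = some ("players", players) := by
  induction channel_info with
  | nil => simp at h
  | cons kv rest ih =>
    obtain ⟨k, v⟩ := kv
    by_cases hk : k = "players"
    · exact ⟨v, by simp [List.find?, hk]⟩
    · have hr : "players" ∈ rest.map Prod.fst := by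
        simp at h; rcases h with h | h
        · exact absurd h.symm hk
        · simpa using h
      obtain ⟨ps, hps⟩ := ih hr
      refine ⟨ps, ?_⟩
      have hb : ((k, v).1 == "players") = false := by simp [hk]
      simp [List.find?, hb, hps]

-- ===== VERDICT (by name: the statement is the Claim_ definition above) =====
theorem can_join_channel_spec : Claim_equal_can_join_channel := by
  intro channel_info agent_role _ hpre
  obtain ⟨players, hps⟩ := pv_get_some channel_info hpre
  obtain ⟨hA, hB⟩ := pv_reduce channel_info agent_role players hps
  unfold Spec_can_join_channel
  rw [hA, hB, pv_body]
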